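-- pv_equiv track=rewrite | github.com/bush-codes/nachomud | nachomud/characters/creation.py | _resolve_choice
-- ===== SOURCE A (Python) =====
-- def _resolve_choice(text: str, options: list[str]) -> str | None:
--     # Numeric pick
--     try:
--         n = int(text)
--         if 1 <= n <= len(options):
--             return options[n - 1]
--     except ValueError:
--         pass
--     # Name match (case-insensitive, prefix)
--     t = text.lower()
--     for opt in options:
--         if opt.lower() == t:
--             return opt
--     for opt in options:
--         if opt.lower().startswith(t):
--             return opt
--     return None
-- ===== SOURCE B (Python) =====
-- def _resolve_choice(text: str, options: list[str]) -> str | None: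
--     # Numeric pick
--     try:
--         n = int(text)
--         if 1 <= n <= len(options):
--             return options[n - 1]
--     except ValueError:
--         pass
--     # Single pass: exact match returns immediately, first prefix match is recorded
--     t = text.lower()
--     prefix_match = None
--     for opt in options:
--         low = opt.lower()
--         if low == t:
--             return opt
--         if prefix_match is None and low.startswith(t):
--             prefix_match = opt
--     return prefix_match
-- ===== Notes on version B (the rewrite author's own statement) =====
-- stated objective: simpler
-- what changed: The two separate scans over options (one for exact lowercase match, one for prefix match) are merged into a single pass that returns immediately on an exact match and records the first prefix match in an accumulator, returned at the end.
import Mathlib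
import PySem

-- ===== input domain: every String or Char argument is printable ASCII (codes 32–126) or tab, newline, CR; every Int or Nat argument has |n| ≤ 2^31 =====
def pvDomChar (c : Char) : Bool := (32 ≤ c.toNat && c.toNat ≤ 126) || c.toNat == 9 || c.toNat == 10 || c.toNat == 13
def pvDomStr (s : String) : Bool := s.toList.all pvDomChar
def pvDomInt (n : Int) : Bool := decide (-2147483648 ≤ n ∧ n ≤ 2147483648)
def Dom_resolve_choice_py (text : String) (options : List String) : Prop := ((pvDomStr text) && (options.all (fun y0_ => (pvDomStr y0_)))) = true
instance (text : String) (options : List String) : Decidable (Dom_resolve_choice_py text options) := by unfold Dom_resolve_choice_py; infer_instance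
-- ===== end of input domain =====

-- B merges A's two scans over options into ONE pass that returns on an exact match
-- and records the first prefix match (objective: simpler).

-- ===== PORT A =====
-- numeric pick: try int(text); if 1 <= n <= len(options) return options[n-1]
def resolveNumericA (text : String) (options : List String) : Option String :=
  match PySem.Int.ofStr? text with
  | some n => if 1 ≤ n ∧ n ≤ (options.length : Int) then PySem.List.pyGet? options (n - 1) else none
  | none => none

def resolve_choice_py (text : String) (options : List String) : Option String :=
  match resolveNumericA text options with
  | some v => some v
  | none =>
    let t := PySem.Str.lower text
    match options.find? (fun opt => PySem.Str.lower opt == t) with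
    | some opt => some opt
    | none => options.find? (fun opt => PySem.Str.startswith (PySem.Str.lower opt) t)

-- ===== PORT B =====
def resolveNumericB (text : String) (options : List String) : Option String :=
  match PySem.Int.ofStr? text with
  | some n => if 1 ≤ n ∧ n ≤ (options.length : Int) then PySem.List.pyGet? options (n - 1) else none
  | none => none

-- the single for-loop of B: early return on exact match, prefix_match accumulator
def resolveLoopB (t : String) (prefixMatch : Option String) : List String → Option String
  | [] => prefixMatch
  | opt :: rest =>
    let low := PySem.Str.lower opt
    if low == t then some opt
    else if prefixMatch.isNone && PySem.Str.startswith low t then resolveLoopB t (some opt) rest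
    else resolveLoopB t prefixMatch rest

def resolve_choice_py_alt (text : String) (options : List String) : Option String :=
  match resolveNumericB text options with
  | some v => some v
  | none => resolveLoopB (PySem.Str.lower text) none options

-- ===== PRECONDITION & SPEC =====
def Spec_resolve_choice_py (text : String) (options : List String) (out : Option String) : Prop := out = resolve_choice_py_alt text options
instance (text : String) (options : List String) (out : Option String) : Decidable (Spec_resolve_choice_py text options out) := by unfold Spec_resolve_choice_py; infer_instance

-- ===== CLAIM (what is proved, stated in full; the proofs are below) =====
def Claim_equal_resolve_choice_py : Prop := ∀ (text : String) (options : List String), Dom_resolve_choice_py text options → Spec_resolve_choice_py text options (resolve_choice_py text options)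

-- ===== LEMMAS AND PROOFS =====

-- B's single pass with accumulator pm computes: the first exact match if any,
-- else pm if already recorded, else the first prefix match.
theorem resolveLoopB_eq (t : String) (l : List String) (pm : Option String) :
    resolveLoopB t pm l =
      match l.find? (fun opt => PySem.Str.lower opt == t) with
      | some opt => some opt
      | none =>
        match pm with
        | some p => some p
        | none => l.find? (fun opt => PySem.Str.startswith (PySem.Str.lower opt) t) := by
  induction l generalizing pm with
  | nil => cases pm <;> simp [resolveLoopB]
  | cons opt rest ih =>
    simp only [resolveLoopB, List.find?]
    by_cases hexact : (PySem.Str.lower opt == t) = true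
    · simp [hexact]
    · simp only [hexact, if_false, Bool.false_eq_true]
      cases pm with
      | some p =>
        rw [if_neg (by simp), ih]
      | none =>
        by_cases hpre : PySem.Str.startswith (PySem.Str.lower opt) t = true
        · simp only [Option.isNone, Bool.true_and, hpre, if_true]
          rw [ih]
        · simp only [Option.isNone, Bool.true_and, hpre, Bool.false_eq_true, if_false]
          rw [ih]

-- ===== VERDICT (by name: the statement is the Claim_ definition above) =====
theorem resolve_choice_py_spec : Claim_equal_resolve_choice_py := by
  intro text options _
  unfold Spec_resolve_choice_py resolve_choice_py resolve_choice_py_alt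
  have hnum : resolveNumericA text options = resolveNumericB text options := rfl
  rw [hnum]
  cases resolveNumericB text options with
  | some v => rfl
  | none =>
    rw [resolveLoopB_eq]
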